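-- pv_equiv track=rewrite | github.com/lliendo/PyZ80 | z80_helper.py | rotate_right_byte
-- ===== SOURCE A (Python) =====
-- def rotate_right_byte(byte, n) :
--     """ Rotates a byte right n times. """
--     byte &= 0xFF
--
--     while n :
--         if byte & 0x1 :
--             byte = (byte >> 1) + 0x80
--         else :
--             byte = byte >> 1
--
--         n -= 1
--
--     return byte
-- ===== SOURCE B (Python) =====
-- def rotate_right_byte(byte, n):
--     """ Rotates a byte right n times: closed form, O(1) via n mod 8. """
--     b = byte % 256
--     k = n % 8
--     return b // 2 ** k + b % 2 ** k * 2 ** (8 - k)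
-- ===== Notes on version B (the rewrite author's own statement) =====
-- stated objective: faster
-- what changed: Replaces the n-step rotate-by-one while loop by a constant-time closed form: reduce n mod 8 and recombine the two halves of the byte arithmetically (b // 2**k + b % 2**k * 2**(8-k)).
import Mathlib
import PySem

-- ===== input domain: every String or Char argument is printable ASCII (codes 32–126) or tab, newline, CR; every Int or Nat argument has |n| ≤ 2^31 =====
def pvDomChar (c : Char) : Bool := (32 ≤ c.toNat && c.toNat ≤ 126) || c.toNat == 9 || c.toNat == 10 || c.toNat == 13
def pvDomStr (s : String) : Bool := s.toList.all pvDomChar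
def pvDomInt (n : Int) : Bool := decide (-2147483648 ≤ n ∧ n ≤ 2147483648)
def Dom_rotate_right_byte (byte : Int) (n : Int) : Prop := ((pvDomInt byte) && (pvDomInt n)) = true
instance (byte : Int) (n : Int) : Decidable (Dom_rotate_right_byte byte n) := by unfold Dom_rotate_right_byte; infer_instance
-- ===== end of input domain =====

-- B replaces A's n-step rotate-by-one while loop by an O(1) closed form (reduce n mod 8,
-- recombine the two halves of the byte arithmetically); timing run measured it faster.


-- ===== PORT A =====
-- the while loop: one structural recursion step per Python iteration, same state (byte, n)
def rrbLoop : Int → Nat → Int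
  | b, 0 => b
  | b, k + 1 =>
      rrbLoop (if PySem.Int.band b 1 == 1 then (b >>> 1) + 128 else b >>> 1) k

-- 'byte &= 0xFF' is PySem.Int.band byte 255; the loop runs n times (Pre_ gives 0 ≤ n,
-- since for n < 0 Python's 'while n: … n -= 1' never terminates)
def rotate_right_byte (byte : Int) (n : Int) : Int :=
  rrbLoop (PySem.Int.band byte 255) n.toNat

-- ===== PORT B =====
-- b = byte % 256; k = n % 8; b // 2**k + b % 2**k * 2**(8-k)
-- (k = n % 8 lies in [0,8), so '.toNat' of it is exact; Python's '**' is Lean's '^')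
def rotate_right_byte_alt (byte : Int) (n : Int) : Int :=
  let b := PySem.Int.mod byte 256
  let k := (PySem.Int.mod n 8).toNat
  PySem.Int.floordiv b (2 ^ k) + PySem.Int.mod b (2 ^ k) * 2 ^ (8 - k)

-- ===== PRECONDITION & SPEC =====
-- Pre_ excludes n < 0, on which A's 'while n' loop never terminates (A diverges, returns nothing).
def Pre_rotate_right_byte (byte : Int) (n : Int) : Prop := 0 ≤ n
instance (byte : Int) (n : Int) : Decidable (Pre_rotate_right_byte byte n) := by unfold Pre_rotate_right_byte; infer_instance
def pvWitness_rotate_right_byte : Int × Int := (75, 3)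

def Spec_rotate_right_byte (byte : Int) (n : Int) (out : Int) : Prop := out = rotate_right_byte_alt byte n
instance (byte : Int) (n : Int) (out : Int) : Decidable (Spec_rotate_right_byte byte n out) := by unfold Spec_rotate_right_byte; infer_instance

-- ===== CLAIM (what is proved, stated in full; the proofs are below) =====
def Claim_equal_rotate_right_byte : Prop := ∀ (byte : Int) (n : Int), Dom_rotate_right_byte byte n → Pre_rotate_right_byte byte n → Spec_rotate_right_byte byte n (rotate_right_byte byte n)

-- ===== LEMMAS AND PROOFS =====

-- rotate-right-by-k closed form on a byte value
def pvRot (k : Nat) (b : Int) : Int := b / 2 ^ k + b % 2 ^ k * 2 ^ (8 - k)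

-- Python's  a & 0xFF  equals  a % 256  (floor mod)
theorem band255_eq (a : Int) : PySem.Int.band a 255 = a % 256 := by
  have hand : ∀ x : Nat, x &&& 255 = x % 256 := by
    intro x
    have h := Nat.and_two_pow_sub_one_eq_mod x 8
    norm_num at h
    exact h
  unfold PySem.Int.band
  by_cases h : 0 ≤ a
  · rw [if_pos h, if_pos (show (0:Int) ≤ 255 by norm_num)]
    rw [show Int.toNat 255 = 255 from rfl, hand]
    omega
  · rw [if_neg h, if_pos (show (0:Int) ≤ 255 by norm_num)]
    rw [show Int.toNat 255 = 255 from rfl, Nat.and_comm, hand]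
    omega

set_option maxRecDepth 40000 in
theorem fin_key : ∀ b : Fin 256, ∀ m : Fin 9, rrbLoop (b : Int) (m : Nat) = pvRot ((m : Nat) % 8) (b : Int) := by decide

theorem rrbLoop_add (j t : Nat) : ∀ b : Int, rrbLoop b (j + t) = rrbLoop (rrbLoop b j) t := by
  induction j with
  | zero => intro b; rw [Nat.zero_add]; rfl
  | succ j ih =>
      intro b
      show rrbLoop b (j + 1 + t) = _
      rw [show j + 1 + t = (j + t) + 1 by omega]
      simp only [rrbLoop]
      exact ih _

theorem rrbLoop_key (m : Nat) : ∀ b : Int, 0 ≤ b → b < 256 → rrbLoop b m = pvRot (m % 8) b := by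
  induction m using Nat.strong_induction_on with
  | _ m ih =>
    intro b hb0 hb1
    by_cases hm : m ≤ 8
    · have h := fin_key ⟨b.toNat, by omega⟩ ⟨m, by omega⟩
      simpa [Int.toNat_of_nonneg hb0] using h
    · have h8 : rrbLoop b 8 = b := by
        have h := fin_key ⟨b.toNat, by omega⟩ ⟨8, by omega⟩
        simpa [Int.toNat_of_nonneg hb0, pvRot] using h
      have : rrbLoop b m = rrbLoop b (m - 8) := by
        conv_lhs => rw [show m = 8 + (m - 8) by omega]
        rw [rrbLoop_add, h8]
      rw [this, ih (m - 8) (by omega) b hb0 hb1]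
      congr 1
      omega

-- ===== VERDICT (by name: the statement is the Claim_ definition above) =====
theorem rotate_right_byte_spec : Claim_equal_rotate_right_byte := by
  intro byte n _ hn
  replace hn : 0 ≤ n := hn
  unfold Spec_rotate_right_byte rotate_right_byte rotate_right_byte_alt
  have hb255 := band255_eq byte
  have hmod : PySem.Int.mod byte 256 = byte % 256 := PySem.Int.mod_eq_emod_of_pos (by norm_num)
  have hmodn : PySem.Int.mod n 8 = n % 8 := PySem.Int.mod_eq_emod_of_pos (by norm_num)
  have hb0 : 0 ≤ byte % 256 := Int.emod_nonneg byte (by norm_num)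
  have hb1 : byte % 256 < 256 := Int.emod_lt_of_pos byte (by norm_num)
  have hk : (PySem.Int.mod n 8).toNat = n.toNat % 8 := by rw [hmodn]; omega
  rw [hb255, rrbLoop_key _ _ hb0 hb1]
  simp only [hmod, hk, pvRot]
  have hpow : (0:Int) < 2 ^ (n.toNat % 8) := by positivity
  rw [PySem.Int.floordiv_eq_ediv_of_pos hpow, PySem.Int.mod_eq_emod_of_pos hpow]
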